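-- pv_equiv track=rewrite | github.com/juan-carvajal/VMIwithDRL | VMIwithDRL/src/validation.py | fifo_ship
-- ===== SOURCE A (Python) =====
-- def fifo_ship(inventory, shipment_size):
--     if (sum(inventory) < shipment_size):
--         raise Exception("Shipment size can't exceed inventory")
--
--     shipment = [0] * len(inventory)
--     for i, val in enumerate(shipment):
--         if i == 0:
--             shipment[i] = min(shipment_size, inventory[i])
--         else:
--             shipment[i] = min(shipment_size - sum(shipment[0:i]), inventory[i])
--     return shipment
-- ===== SOURCE B (Python) =====
-- def fifo_ship(inventory, shipment_size):
--     if sum(inventory) < shipment_size: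
--         raise Exception("Shipment size can't exceed inventory")
--     shipment = []
--     remaining = shipment_size
--     for val in inventory:
--         x = min(remaining, val)
--         shipment.append(x)
--         remaining -= x
--     return shipment
-- ===== Notes on version B (the rewrite author's own statement) =====
-- stated objective: faster
-- what changed: Single pass carrying a running 'remaining' amount instead of re-summing the already-shipped prefix (and re-slicing it) at every index.
import Mathlib
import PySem

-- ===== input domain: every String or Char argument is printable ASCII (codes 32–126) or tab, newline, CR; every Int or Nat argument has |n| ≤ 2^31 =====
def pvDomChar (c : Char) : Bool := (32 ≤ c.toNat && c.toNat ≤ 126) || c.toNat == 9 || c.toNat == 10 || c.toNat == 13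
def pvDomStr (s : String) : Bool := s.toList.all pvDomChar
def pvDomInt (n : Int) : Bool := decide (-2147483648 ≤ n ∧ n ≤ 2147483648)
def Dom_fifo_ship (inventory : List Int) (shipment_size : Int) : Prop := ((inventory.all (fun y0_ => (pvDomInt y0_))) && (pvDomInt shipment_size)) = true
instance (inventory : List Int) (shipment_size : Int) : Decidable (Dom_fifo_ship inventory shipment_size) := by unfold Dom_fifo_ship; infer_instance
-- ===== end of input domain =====

-- B replaces A's quadratic re-summing of the shipped prefix by a single pass with a running remainder;
-- the guard 'sum(inventory) < shipment_size raises' is kept in B and excluded by Pre_.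

-- ===== PORT A =====
-- Literal port of A's loop: 'for i, val in enumerate(shipment)' over the zero-initialised list
-- ('val' is never used by the body); 'shipment[0:i]' is PySem.List.slice; 'inventory[i]' is always
-- in range (0 ≤ i < len inventory = len shipment), so pyGetD's default is never taken.
def fifo_ship (inventory : List Int) (shipment_size : Int) : List Int :=
  (PySem.List.enumerate (List.replicate inventory.length 0) 0).foldl
    (fun shipment iv =>
      if iv.1 == 0 then
        PySem.List.pySetD shipment iv.1 (min shipment_size (PySem.List.pyGetD inventory iv.1 0))
      else
        PySem.List.pySetD shipment iv.1
          (min (shipment_size - (PySem.List.slice shipment (some 0) (some iv.1)).sum)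
               (PySem.List.pyGetD inventory iv.1 0)))
    (List.replicate inventory.length 0)

-- ===== PORT B =====
-- B's loop 'for val in inventory: x = min(remaining, val); append x; remaining -= x'
def fifoGo : List Int → Int → List Int
  | [], _ => []
  | v :: t, rem => min rem v :: fifoGo t (rem - min rem v)

def fifo_ship_alt (inventory : List Int) (shipment_size : Int) : List Int :=
  fifoGo inventory shipment_size

-- ===== PRECONDITION & SPEC =====
-- Pre_ excludes exactly the inputs where A (and B) raise: sum(inventory) < shipment_size.
def Pre_fifo_ship (inventory : List Int) (shipment_size : Int) : Prop :=
  shipment_size ≤ inventory.sum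
instance (inventory : List Int) (shipment_size : Int) : Decidable (Pre_fifo_ship inventory shipment_size) := by unfold Pre_fifo_ship; infer_instance

def pvWitness_fifo_ship : List Int × Int := ([3, 5, 2], 7)

def Spec_fifo_ship (inventory : List Int) (shipment_size : Int) (out : List Int) : Prop := out = fifo_ship_alt inventory shipment_size
instance (inventory : List Int) (shipment_size : Int) (out : List Int) : Decidable (Spec_fifo_ship inventory shipment_size out) := by unfold Spec_fifo_ship; infer_instance

-- ===== CLAIM (what is proved, stated in full; the proofs are below) =====
def Claim_equal_fifo_ship : Prop := ∀ (inventory : List Int) (shipment_size : Int), Dom_fifo_ship inventory shipment_size → Pre_fifo_ship inventory shipment_size → Spec_fifo_ship inventory shipment_size (fifo_ship inventory shipment_size)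

-- ===== LEMMAS AND PROOFS =====

theorem length_fifoGo (inv : List Int) (s : Int) : (fifoGo inv s).length = inv.length := by
  induction inv generalizing s with
  | nil => rfl
  | cons v t ih => simp [fifoGo, ih]

-- B's i-th element is exactly the min-formula A computes from the prefix sum of B's own output.
theorem fifoGo_getD (inv : List Int) (s : Int) (i : Nat) (hi : i < inv.length) :
    (fifoGo inv s).getD i 0
      = min (s - ((fifoGo inv s).take i).sum) (inv.getD i 0) := by
  induction inv generalizing s i with
  | nil => simp at hi
  | cons v t ih =>
    cases i with
    | zero => simp [fifoGo]
    | succ j =>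
      have hj : j < t.length := by simpa using hi
      simp only [fifoGo, List.getD_cons_succ, List.take_succ_cons, List.sum_cons]
      rw [ih (s - min s v) j hj]
      ring_nf

theorem fifoGo_take_succ (inv : List Int) (s : Int) (i : Nat) (hi : i < inv.length) :
    (fifoGo inv s).take (i + 1) = (fifoGo inv s).take i ++ [(fifoGo inv s).getD i 0] := by
  have h : i < (fifoGo inv s).length := by rwa [length_fifoGo]
  rw [List.take_add_one]
  simp [List.getElem?_eq_getElem h]

-- Invariant of A's loop: after the first i iterations the shipment list is
-- B's first i values followed by the untouched zeros.
theorem loop_inv (inv : List Int) (s : Int) (i : Nat) (hi : i ≤ inv.length) :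
    (PySem.List.pyRange 0 (i : Int) 1).foldl
      (fun shipment j =>
        if j == 0 then
          PySem.List.pySetD shipment j (min s (PySem.List.pyGetD inv j 0))
        else
          PySem.List.pySetD shipment j
            (min (s - (PySem.List.slice shipment (some 0) (some j)).sum)
                 (PySem.List.pyGetD inv j 0)))
      (List.replicate inv.length 0)
    = (fifoGo inv s).take i ++ List.replicate (inv.length - i) 0 := by
  induction i with
  | zero => simp [PySem.List.pyRange_one_eq_nil]
  | succ k ih =>
    have hk : k ≤ inv.length := Nat.le_of_succ_le hi
    have hklt : k < inv.length := hi
    have hrange : PySem.List.pyRange 0 ((k : Int) + 1) 1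
        = PySem.List.pyRange 0 (k : Int) 1 ++ [(k : Int)] :=
      PySem.List.pyRange_one_succ_right (by omega)
    have hlenB : (fifoGo inv s).length = inv.length := length_fifoGo inv s
    have htk : ((fifoGo inv s).take k).length = k := by
      simp [List.length_take, hlenB]; omega
    have hval : min (s - ((fifoGo inv s).take k).sum) (inv.getD k 0)
        = (fifoGo inv s).getD k 0 := (fifoGo_getD inv s k hklt).symm
    push_cast
    rw [hrange, List.foldl_append, ih hk]
    have hrep : List.replicate (inv.length - k) (0 : Int)
        = 0 :: List.replicate (inv.length - (k + 1)) 0 := by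
      rw [← List.replicate_succ]; congr 1; omega
    have hslice : PySem.List.slice
          ((fifoGo inv s).take k ++ List.replicate (inv.length - k) 0) (some 0) (some (k : Int))
        = (fifoGo inv s).take k := by
      rw [PySem.List.slice_zero_start, PySem.List.slice_to_natCast]
      rw [List.take_append_of_le_length (by omega), List.take_take]
      simp
    have hset : ∀ x : Int,
        ((fifoGo inv s).take k ++ List.replicate (inv.length - k) 0).set k x
        = (fifoGo inv s).take k ++ x :: List.replicate (inv.length - (k + 1)) 0 := by
      intro x
      rw [List.set_append_right _ _ (by omega), htk, hrep]
      simp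
    by_cases hk0 : k = 0
    · subst hk0
      simp only [List.foldl_cons, List.foldl_nil, Nat.cast_zero, beq_self_eq_true, if_true]
      rw [PySem.List.pySetD_of_nonneg _ _ (le_refl 0), PySem.List.pyGetD_zero]
      simp only [Int.toNat_zero]
      rw [hset (min s (inv.getD 0 0)), fifoGo_take_succ inv s 0 hklt]
      have h0 : (fifoGo inv s).getD 0 0 = min s (inv.getD 0 0) := by
        rw [fifoGo_getD inv s 0 hklt]; simp
      simp only [List.getD] at h0
      simp [h0]
    · have hne : ((k : Int) == 0) = false := by
        simp; omega
      simp only [List.foldl_cons, List.foldl_nil, hne,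
        PySem.List.pySetD_natCast, PySem.List.pyGetD_natCast]
      rw [hslice, hval, hset ((fifoGo inv s).getD k 0), fifoGo_take_succ inv s k hklt]
      simp

theorem fifo_ship_spec_aux (inventory : List Int) (shipment_size : Int) :
    fifo_ship inventory shipment_size = fifo_ship_alt inventory shipment_size := by
  unfold fifo_ship fifo_ship_alt
  rw [PySem.List.enumerate_eq_map_pyRange (d := 0), List.foldl_map]
  simp only [PySem.List.len_eq, List.length_replicate]
  have := loop_inv inventory shipment_size inventory.length (le_refl _)
  simp only [List.take_length, Nat.sub_self, List.replicate_zero, List.append_nil,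
    ← length_fifoGo inventory shipment_size] at this
  rw [length_fifoGo] at this
  exact this

-- ===== VERDICT (by name: the statement is the Claim_ definition above) =====
theorem fifo_ship_spec : Claim_equal_fifo_ship := by
  intro inventory shipment_size _ _
  exact fifo_ship_spec_aux inventory shipment_size
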